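-- pv_equiv track=rewrite | github.com/ARDL99/codewars | python_practice/range_extraction.py | solution
-- ===== SOURCE A (Python) =====
-- def solution(lst):
--     result = []
--     i = 0
--
--     while i < len(lst):
--         start = lst[i]
--         end = start
--
--         while i+1 < len(lst) and lst[i+1] == end + 1:
--             end = lst[i+1]
--             i += 1
--
--         if end - start >= 2:
--             result.append(str(start) + '-' + str(end))
--         elif end - start == 1:
--             result.append(str(start) + ',' + str(end))
--         else:
--             result.append(str(start))
--
--         i += 1
--
--     return ','.join(result)
-- ===== SOURCE B (Python) =====
-- def solution(lst):
--     # No run extraction: classify each element locally from its neighbour links.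
--     out = []
--     pp = p = None
--     for x, nxt in zip(lst, list(lst[1:]) + [None]):
--         prev_link = p is not None and p + 1 == x
--         if not (prev_link and nxt == x + 1):
--             if p is not None:
--                 out.append('-' if prev_link and pp is not None and pp + 1 == p else ',')
--             out.append(str(x))
--         pp, p = p, x
--     return ''.join(out)
-- ===== Notes on version B (the rewrite author's own statement) =====
-- stated objective: alternative
-- what changed: B never extracts runs: a single pass over (element, successor) pairs with two lagged values classifies each element locally (skipped when linked on both sides, otherwise emitted preceded by a '-' or ',' token chosen from the lag pattern) and concatenates the flat token stream with ''.join, instead of A's nested while loops that extract (start,end) runs, format each, and join with ','.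
import Mathlib
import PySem

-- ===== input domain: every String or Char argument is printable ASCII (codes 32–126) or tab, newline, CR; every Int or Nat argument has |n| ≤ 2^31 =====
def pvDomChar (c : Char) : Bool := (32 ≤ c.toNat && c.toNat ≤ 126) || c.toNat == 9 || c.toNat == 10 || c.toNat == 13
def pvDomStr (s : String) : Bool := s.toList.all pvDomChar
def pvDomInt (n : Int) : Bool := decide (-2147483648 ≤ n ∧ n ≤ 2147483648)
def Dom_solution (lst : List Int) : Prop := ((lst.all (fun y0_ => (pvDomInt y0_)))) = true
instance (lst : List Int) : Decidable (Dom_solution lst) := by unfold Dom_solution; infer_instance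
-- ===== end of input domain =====

-- B abandons run extraction: one pass over (element, successor) pairs with two lagged values classifies each element locally (skip / emit with '-' or ',' token) and concatenates the token stream; same cost, genuinely different algorithm.


-- ===== PORT A =====
-- inner while: consume lst[i+1] == end + 1, returning the final `end` and the rest of the list
def innerA : Int → List Int → Int × List Int
  | e, [] => (e, [])
  | e, x :: xs => if x = e + 1 then innerA x xs else (e, x :: xs)

-- termination measure for the outer loop (cited by `decreasing_by` below)
theorem innerA_length_le (e : Int) (rest : List Int) : (innerA e rest).2.length ≤ rest.length := by
  induction rest generalizing e with
  | nil => simp [innerA]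
  | cons x xs ih =>
    simp only [innerA]
    split
    · exact le_trans (ih x) (Nat.le_succ _)
    · simp

-- outer while over the remaining list, accumulating `result`
def loopA : List Int → List String → List String
  | [], result => result
  | x :: xs, result =>
    let p := innerA x xs
    let piece :=
      if p.1 - x ≥ 2 then PySem.Int.toStr x ++ "-" ++ PySem.Int.toStr p.1
      else if p.1 - x = 1 then PySem.Int.toStr x ++ "," ++ PySem.Int.toStr p.1
      else PySem.Int.toStr x
    loopA p.2 (result ++ [piece])
termination_by l _ => l.length
decreasing_by simpa using Nat.lt_succ_of_le (innerA_length_le x xs)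

def solution (lst : List Int) : String := PySem.Str.join "," (loopA lst [])

-- ===== PORT B =====
-- 'p is not None and p + 1 == x'
def ppL : Option Int → Int → Bool
  | some q, v => q + 1 == v
  | none, _ => false

-- the loop body: state (pp, p, out), one zipped pair (x, nxt)
def stepB (st : Option Int × Option Int × List String) (xn : Int × Option Int) :
    Option Int × Option Int × List String :=
  let pp := st.1
  let p := st.2.1
  let out := st.2.2
  let x := xn.1
  let nxt := xn.2
  let prevLink := ppL p x
  let out' :=
    if prevLink && nxt == some (x + 1) then out
    else
      (match p with
       | none => out
       | some pv => out ++ [if prevLink && ppL pp pv then "-" else ","]) ++ [PySem.Int.toStr x]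
  (p, some x, out')

def solution_alt (lst : List Int) : String :=
  let pairs := lst.zip ((PySem.List.slice lst (some 1) none).map some ++ [none])
  PySem.Str.join "" (pairs.foldl stepB (none, none, [])).2.2

-- ===== PRECONDITION & SPEC =====
def Spec_solution (lst : List Int) (out : String) : Prop := out = solution_alt lst
instance (lst : List Int) (out : String) : Decidable (Spec_solution lst out) := by unfold Spec_solution; infer_instance

-- ===== CLAIM (what is proved, stated in full; the proofs are below) =====
def Claim_equal_solution : Prop := ∀ (lst : List Int), Dom_solution lst → Spec_solution lst (solution lst)

-- ===== LEMMAS AND PROOFS =====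

-- the maximal runs as (start, end) pairs — the common yardstick
def spansOf : List Int → List (Int × Int)
  | [] => []
  | x :: xs => (x, (innerA x xs).1) :: spansOf (innerA x xs).2
termination_by l => l.length
decreasing_by simpa using Nat.lt_succ_of_le (innerA_length_le x xs)

-- A's one piece per span
def pieceA (p : Int × Int) : String :=
  if p.2 - p.1 ≥ 2 then PySem.Int.toStr p.1 ++ "-" ++ PySem.Int.toStr p.2
  else if p.2 - p.1 = 1 then PySem.Int.toStr p.1 ++ "," ++ PySem.Int.toStr p.2
  else PySem.Int.toStr p.1

theorem loopA_eq (lst : List Int) (result : List String) :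
    loopA lst result = result ++ (spansOf lst).map pieceA := by
  induction lst using spansOf.induct generalizing result with
  | case1 => simp [loopA, spansOf]
  | case2 x xs ih =>
    rw [loopA, spansOf]
    rw [ih]
    simp [pieceA]

-- B's fold over the zipped list as structural recursion carrying the two lagged values
def runB : Option Int → Option Int → List String → List Int → List String
  | _, _, out, [] => out
  | pp, p, out, x :: xs => runB p (some x) (stepB (pp, p, out) (x, xs.head?)).2.2 xs

theorem zip_runB (lst : List Int) (pp p : Option Int) (out : List String) :
    ((lst.zip (lst.tail.map some ++ [none])).foldl stepB (pp, p, out)).2.2 =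
      runB pp p out lst := by
  induction lst generalizing pp p out with
  | nil => simp [runB]
  | cons x xs ih =>
    cases xs with
    | nil => simp [runB, stepB]
    | cons y ys =>
      have : ((x :: y :: ys).zip ((x :: y :: ys).tail.map some ++ [none])) =
          (x, some y) :: ((y :: ys).zip ((y :: ys).tail.map some ++ [none])) := by simp
      rw [this, List.foldl_cons, runB]
      have hst : stepB (pp, p, out) (x, (y :: ys).head?) = (p, some x, (stepB (pp, p, out) (x, some y)).2.2) := by
        simp [stepB]
      rw [hst]
      exact ih p (some x) _

theorem innerA_ge (xs : List Int) (e : Int) : e ≤ (innerA e xs).1 := by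
  induction xs generalizing e with
  | nil => simp [innerA]
  | cons x xs ih =>
    simp only [innerA]
    split
    · exact le_trans (by omega) (ih x)
    · simp

theorem innerA_rest_nolink (xs : List Int) (e y : Int) (ys : List Int)
    (h : (innerA e xs).2 = y :: ys) : y ≠ (innerA e xs).1 + 1 := by
  induction xs generalizing e with
  | nil => simp [innerA] at h
  | cons x xs ih =>
    simp only [innerA] at h ⊢
    split at h
    · rw [if_pos (by assumption)]
      exact ih x h
    · rw [if_neg (by assumption)]
      obtain ⟨rfl, rfl⟩ : x = y ∧ xs = ys := by
        constructor <;> [exact (List.cons.injEq _ _ _ _ ▸ h).1; exact (List.cons.injEq _ _ _ _ ▸ h).2]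
      intro hc
      omega

-- one maximal chain consumed: the emitted tokens and the final lagged state
theorem runB_run (xs : List Int) (e : Int) (pp : Option Int) (out : List String) :
    runB pp (some e) out xs =
      runB (if (innerA e xs).1 = e then pp else some ((innerA e xs).1 - 1))
           (some (innerA e xs).1)
           (out ++ (if (innerA e xs).1 = e then []
                    else [(if ppL pp e || (innerA e xs).1 ≥ e + 2 then "-" else ","),
                          PySem.Int.toStr (innerA e xs).1]))
           (innerA e xs).2 := by
  induction xs generalizing e pp out with
  | nil => simp [innerA, runB]
  | cons y ys ih =>
    by_cases hy : y = e + 1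
    · subst hy
      simp only [innerA]
      rw [runB]
      by_cases hn : ys.head? = some (e + 1 + 1)
      · -- interior element: skipped
        have hstep : (stepB (pp, some e, out) (e + 1, ys.head?)).2.2 = out := by
          simp [stepB, ppL, hn]
        rw [hstep]
        rw [ih (e + 1) (some e) out]
        have hge : e + 1 + 1 ≤ (innerA (e + 1) ys).1 := by
          cases ys with
          | nil => simp at hn
          | cons z zs =>
            have hz : z = e + 1 + 1 := by simpa using hn
            subst hz
            simp only [innerA]
            exact innerA_ge zs (e + 1 + 1)
        have h1 : ¬ (innerA (e + 1) ys).1 = e := by omega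
        have h2 : ¬ (innerA (e + 1) ys).1 = e + 1 := by omega
        have h3 : (ppL (some e) (e + 1) || (innerA (e + 1) ys).1 ≥ e + 1 + 2) = true := by
          simp [ppL]
        have h4 : (ppL pp e || (innerA (e + 1) ys).1 ≥ e + 2) = true := by
          simp; omega
        simp [h1, h2, h3, h4]
      · -- chain ends here: e+1 is emitted
        have hstep : (stepB (pp, some e, out) (e + 1, ys.head?)).2.2 =
            out ++ [if ppL pp e then "-" else ","] ++ [PySem.Int.toStr (e + 1)] := by
          simp only [stepB, ppL]
          rw [if_neg]
          · simp
          · simp [hn]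
        have hinner : innerA (e + 1) ys = (e + 1, ys) := by
          cases ys with
          | nil => simp [innerA]
          | cons z zs =>
            have : ¬ z = e + 1 + 1 := fun hc => hn (by simp [hc])
            simp [innerA, this]
        rw [hstep, hinner]
        have h1 : ¬ (e + 1 : Int) = e := by omega
        have h2 : ¬ ((e + 1 : Int) ≥ e + 2) := by omega
        simp [h1, h2]
    · simp [innerA, hy]

-- the expected token stream of the span list
def outTokens : Bool → List (Int × Int) → List String
  | _, [] => []
  | lead, s :: rest =>
    (if lead then [","] else []) ++
    (if s.2 - s.1 ≥ 2 then [PySem.Int.toStr s.1, "-", PySem.Int.toStr s.2]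
     else if s.2 - s.1 = 1 then [PySem.Int.toStr s.1, ",", PySem.Int.toStr s.2]
     else [PySem.Int.toStr s.1]) ++ outTokens true rest

theorem runB_main (lst : List Int) (pp p : Option Int) (out : List String)
    (h : ∀ pv y ys, p = some pv → lst = y :: ys → pv + 1 ≠ y) :
    runB pp p out lst = out ++ outTokens p.isSome (spansOf lst) := by
  induction lst using spansOf.induct generalizing pp p out with
  | case1 => simp [runB, spansOf, outTokens]
  | case2 x xs ih =>
    have hpl : ppL p x = false := by
      cases p with
      | none => rfl
      | some pv =>
        have := h pv x xs rfl rfl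
        simp [ppL]
        omega
    rw [runB]
    have hstep : (stepB (pp, p, out) (x, xs.head?)).2.2 =
        out ++ (if p.isSome then [","] else []) ++ [PySem.Int.toStr x] := by
      cases p with
      | none => simp [stepB, ppL]
      | some pv => simp [stepB, hpl]
    rw [hstep, runB_run xs x]
    have hge : x ≤ (innerA x xs).1 := innerA_ge xs x
    have hno : ∀ pv y ys, (some ((innerA x xs).1) : Option Int) = some pv →
        (innerA x xs).2 = y :: ys → pv + 1 ≠ y := by
      intro pv y ys hpv hr
      injection hpv with hpv
      subst hpv
      exact (innerA_rest_nolink xs x y ys hr).symm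
    rw [ih _ _ _ hno]
    conv_rhs => rw [spansOf]
    simp only [outTokens, hpl, Bool.false_or, Option.isSome_some]
    by_cases h0 : (innerA x xs).1 = x
    · have h1 : ¬ ((innerA x xs).1 - x ≥ 2) := by omega
      have h2 : ¬ ((innerA x xs).1 - x = 1) := by omega
      simp [h0]
    · by_cases h3 : (innerA x xs).1 ≥ x + 2
      · have h1 : (innerA x xs).1 - x ≥ 2 := by omega
        simp [h0, h3, h1]
      · have h1 : ¬ ((innerA x xs).1 - x ≥ 2) := by omega
        have h2 : (innerA x xs).1 - x = 1 := by omega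
        simp [h0, h3, h1, h2]

-- joining machinery: comma-prefixed flattening
def J (l : List (List Char)) : List Char := l.flatMap (fun t => ',' :: t)

theorem join_comma (l : List (List Char)) (h : l ≠ []) :
    ',' :: PySem.Chars.join [','] l = J l := by
  induction l with
  | nil => exact absurd rfl h
  | cons p rest ih =>
    cases rest with
    | nil => simp [PySem.Chars.join_singleton, J]
    | cons q rest' =>
      rw [PySem.Chars.join_cons_cons]
      simp only [J, List.flatMap_cons] at ih ⊢
      have := ih (by simp)
      simp [← this]

theorem join_empty_flatten (l : List (List Char)) : PySem.Chars.join [] l = l.flatten := by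
  induction l with
  | nil => simp [PySem.Chars.join_nil]
  | cons a rest ih =>
    cases rest with
    | nil => simp [PySem.Chars.join_singleton]
    | cons b r => rw [PySem.Chars.join_cons_cons]; simp_all

theorem render_flat (s : Int × Int) :
    (((if s.2 - s.1 ≥ 2 then [PySem.Int.toStr s.1, "-", PySem.Int.toStr s.2]
       else if s.2 - s.1 = 1 then [PySem.Int.toStr s.1, ",", PySem.Int.toStr s.2]
       else [PySem.Int.toStr s.1])).map String.toList).flatten = (pieceA s).toList := by
  unfold pieceA
  split_ifs <;> simp

theorem tok_true (spans : List (Int × Int)) :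
    ((outTokens true spans).map String.toList).flatten =
      J ((spans.map pieceA).map String.toList) := by
  induction spans with
  | nil => rfl
  | cons s rest ih =>
    simp only [outTokens, if_pos, List.map_append, List.flatten_append, ih,
      List.map_cons, J, List.flatMap_cons]
    rw [← render_flat s]
    simp

theorem tok_join (spans : List (Int × Int)) :
    PySem.Str.join "" (outTokens false spans) =
      PySem.Str.join "," ((spans.map pieceA)) := by
  unfold PySem.Str.join
  congr 1
  rw [show ("".toList) = ([] : List Char) from rfl, join_empty_flatten]
  cases spans with
  | nil => rfl
  | cons s rest =>
    have hflat : ((outTokens false (s :: rest)).map String.toList).flatten =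
        (pieceA s).toList ++ J ((rest.map pieceA).map String.toList) := by
      simp only [outTokens, if_neg Bool.false_ne_true, List.nil_append, List.map_append,
        List.flatten_append, tok_true, render_flat s]
    rw [hflat]
    cases rest with
    | nil => simp [PySem.Chars.join_singleton, J]
    | cons t r =>
      simp only [List.map_cons]
      rw [show (",".toList) = [','] from rfl, PySem.Chars.join_cons_cons]
      simp only [List.append_assoc, List.singleton_append]
      rw [join_comma _ (by simp)]

-- ===== VERDICT (by name: the statement is the Claim_ definition above) =====
theorem solution_spec : Claim_equal_solution := by
  intro lst _
  unfold Spec_solution solution solution_alt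
  rw [loopA_eq]
  simp only [List.nil_append]
  rw [PySem.List.slice_from_one, zip_runB, runB_main lst none none [] (by simp)]
  simp only [Option.isSome_none, List.nil_append]
  rw [tok_join]
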